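-- pv_equiv track=rewrite | github.com/3uyuan1ee/Fix_agent | Dataset/core/agent.py | _extract_fixed_files
-- ===== SOURCE A (Python) =====
-- from typing import Any, Dict, List, Optional, Tuple
--
-- def _extract_fixed_files(output: str) -> List[str]:
--     """从输出中提取修复的文件列表"""
--
--     # 这里需要根据实际的agent输出格式提取文件列表
--     # 简化实现，实际可能需要更复杂的解析逻辑
--
--     fixed_files = []
--
--     # 简单的关键词匹配
--     lines = output.split("\n")
--     for line in lines:
--         if any(
--             keyword in line.lower()
--             for keyword in ["fixed:", "modified:", "updated:", "changed:"]
--         ):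
--             # 尝试提取文件路径
--             words = line.split()
--             for word in words:
--                 if "." in word and any(
--                     word.endswith(ext)
--                     for ext in [".py", ".js", ".java", ".cpp", ".c"]
--                 ):
--                     fixed_files.append(word)
--
--     return list(set(fixed_files))  # 去重
-- ===== SOURCE B (Python) =====
-- import re
--
-- # one MULTILINE pass over the whole text: every line containing a keyword
-- # (case-insensitive substring) is matched exactly once as the whole line
-- _LINE_RE = re.compile(r"^.*(?:fixed:|modified:|updated:|changed:).*$",
--                       re.IGNORECASE | re.MULTILINE)
-- # a whole whitespace-delimited token ending in one of the extensions
-- _TOKEN_RE = re.compile(r"\S*(?:\.py|\.js|\.java|\.cpp|\.c)(?=\s|$)")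
--
--
-- def _extract_fixed_files(output: str) -> list:
--     """Two regex passes instead of nested line/word loops: findall the keyword
--     lines over the whole text, then findall the extension-ending tokens."""
--     return list({tok
--                  for line in _LINE_RE.findall(output)
--                  for tok in _TOKEN_RE.findall(line)})
-- ===== Notes on version B (the rewrite author's own statement) =====
-- stated objective: idiomatic
-- what changed: A nests an explicit line loop (keyword substring test on the lowered line) inside which a second word loop re-splits the line and checks dot-membership plus endswith, collecting duplicates into a list deduplicated at the end; B is two declarative regex passes: one MULTILINE case-insensitive findall over the whole text yields the keyword lines, then a token regex (whole whitespace token anchored to end in one of the extensions) findall per matched line feeds a set comprehension.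
import Mathlib
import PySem

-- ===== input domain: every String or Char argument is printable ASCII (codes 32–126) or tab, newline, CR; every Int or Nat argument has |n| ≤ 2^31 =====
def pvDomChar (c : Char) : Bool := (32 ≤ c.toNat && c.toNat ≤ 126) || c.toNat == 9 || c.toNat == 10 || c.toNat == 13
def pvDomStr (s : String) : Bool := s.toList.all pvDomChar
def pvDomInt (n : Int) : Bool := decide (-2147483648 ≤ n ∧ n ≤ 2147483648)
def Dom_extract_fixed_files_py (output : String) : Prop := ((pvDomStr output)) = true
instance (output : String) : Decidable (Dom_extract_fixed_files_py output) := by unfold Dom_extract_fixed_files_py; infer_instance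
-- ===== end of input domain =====

-- B replaces A's nested line/word loops (keyword substring on the lowered line, then a second
-- word scan with a dot-membership plus endswith check, deduplicated at the end) by two staged
-- regex passes: a MULTILINE case-insensitive findall of the keyword lines over the whole text,
-- then a token-regex findall per matched line feeding a set comprehension (alternative/idiomatic
-- decomposition, same asymptotic cost).

-- ===== PORT A =====
-- A's keyword and extension literal lists
def pvKwsA : List String := ["fixed:", "modified:", "updated:", "changed:"]
def pvExtsA : List String := [".py", ".js", ".java", ".cpp", ".c"]

def extract_fixed_files_py (output : String) : List String :=
  -- lines = output.split("\n")   (nonempty literal separator, so Python cannot raise;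
  -- this map over PySem.Chars.splitOn is exactly what PySem.Str.split? unfolds to)
  let lines := (PySem.Chars.splitOn output.toList ['\n']).map String.ofList
  -- fixed_files = [] ; for line in lines: …
  let fixed_files := lines.foldl (fun acc line =>
    -- if any(keyword in line.lower() for keyword in [...]):
    if pvKwsA.any (fun kw => PySem.Str.isIn kw (PySem.Str.lower line)) then
      -- words = line.split() ; for word in words: …
      (PySem.Str.split₀ line).foldl (fun acc2 w =>
        -- if "." in word and any(word.endswith(ext) for ext in [...]):
        if PySem.Str.isIn "." w && pvExtsA.any (fun ext => PySem.Str.endswith w ext) then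
          acc2 ++ [w]  -- fixed_files.append(word)
        else acc2) acc
    else acc) []
  -- return list(set(fixed_files))
  PySem.Set.ofList fixed_files

-- ===== PORT B =====
-- _LINE_RE.findall(output): with re.MULTILINE, '^.*(?:kw|…).*$' matches (since '.' never
-- crosses '\n') exactly the lines of output.split("\n") that contain one of the four keywords,
-- each exactly once as the whole line, in order; re.IGNORECASE substring search over ASCII
-- equals plain substring search on the lowercased line. Exact on Dom's ASCII text.
def pvLineFindall (output : String) : List String :=
  ((PySem.Chars.splitOn output.toList ['\n']).map String.ofList).filter fun line =>
    PySem.Str.isIn "fixed:" (PySem.Str.lower line) || PySem.Str.isIn "modified:" (PySem.Str.lower line) ||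
    PySem.Str.isIn "updated:" (PySem.Str.lower line) || PySem.Str.isIn "changed:" (PySem.Str.lower line)

-- the maximal non-whitespace runs (the whitespace-delimited tokens) of a line: the only
-- stretches inside which '\S*(?:ext)(?=\s|$)' can match
def pvRegexTokens (cs : List Char) : List (List Char) :=
  match cs with
  | [] => []
  | c :: rest =>
    if PySem.Chars.isspace c then pvRegexTokens rest
    else (c :: rest.takeWhile (fun d => !PySem.Chars.isspace d)) ::
         pvRegexTokens (rest.dropWhile (fun d => !PySem.Chars.isspace d))
termination_by cs.length
decreasing_by
  all_goals simp only [List.length_cons]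
  all_goals exact Nat.lt_succ_of_le (by first | exact Nat.le_refl _ | exact List.length_dropWhile_le _ _)

-- w.endswith((".py", ".js", ".java", ".cpp", ".c")) — the token regex's suffix alternation
def pvEndsExt (w : String) : Bool :=
  PySem.Str.endswith w ".py" || PySem.Str.endswith w ".js" || PySem.Str.endswith w ".java" ||
  PySem.Str.endswith w ".cpp" || PySem.Str.endswith w ".c"

-- _TOKEN_RE.findall(line): the lookahead '(?=\s|$)' forces every match to end at a token
-- boundary and greedy '\S*' with leftmost scanning makes it start at the token's start, so the
-- matches are exactly the whole tokens ending in one of the extensions, in order. Exact.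
def pvTokenFindall (line : String) : List String :=
  ((pvRegexTokens line.toList).map String.ofList).filter pvEndsExt

def extract_fixed_files_py_alt (output : String) : List String :=
  -- {tok for line in _LINE_RE.findall(output) for tok in _TOKEN_RE.findall(line)}, built in
  -- iteration order; list(s) returns the set's elements (PySem.Set compares as a finite set)
  (pvLineFindall output).foldl (fun s line => PySem.Set.update s (pvTokenFindall line)) []

-- ===== PRECONDITION & SPEC =====
def Spec_extract_fixed_files_py (output : String) (out : List String) : Prop := out = extract_fixed_files_py_alt output
instance (output : String) (out : List String) : Decidable (Spec_extract_fixed_files_py output out) := by unfold Spec_extract_fixed_files_py; infer_instance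

-- ===== CLAIM (what is proved, stated in full; the proofs are below) =====
def Claim_equal_extract_fixed_files_py : Prop := ∀ (output : String), Dom_extract_fixed_files_py output → Spec_extract_fixed_files_py output (extract_fixed_files_py output)

-- ===== LEMMAS AND PROOFS =====

-- PySem's split() agrees with the maximal-non-whitespace-run tokenizer
lemma pv_go_eq (s : List Char) : ∀ cur acc, PySem.Chars.split₀.go s cur acc =
    acc.reverse ++ (if cur.isEmpty then pvRegexTokens s
      else (cur.reverse ++ s.takeWhile (fun d => !PySem.Chars.isspace d)) ::
           pvRegexTokens (s.dropWhile (fun d => !PySem.Chars.isspace d))) := by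
  induction s with
  | nil => intro cur acc; cases cur <;> simp [PySem.Chars.split₀.go, pvRegexTokens]
  | cons c rest ih =>
    intro cur acc
    by_cases hs : PySem.Chars.isspace c
    · cases cur with
      | nil => simp [PySem.Chars.split₀.go, hs, ih, pvRegexTokens]
      | cons a b => simp [PySem.Chars.split₀.go, hs, ih, pvRegexTokens]
    · cases cur with
      | nil => simp [PySem.Chars.split₀.go, hs, ih, pvRegexTokens]
      | cons a b => simp [PySem.Chars.split₀.go, hs, ih]

lemma pv_split₀_eq (cs : List Char) : PySem.Chars.split₀ cs = pvRegexTokens cs := by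
  simpa using pv_go_eq cs [] []

-- a word ending in one of the (dot-initial) extensions always contains '.'
lemma pv_ends_dot (w e : String) (he : '.' ∈ e.toList) (h : PySem.Str.endswith w e = true) :
    PySem.Str.isIn "." w = true := by
  rw [PySem.Str.isIn_iff_infix]
  have hsuf : e.toList <:+ w.toList := by
    have h' := h
    simp only [PySem.Str.endswith_eq] at h'
    exact (PySem.Chars.endswith_iff _ _).mp h'
  have hm : '.' ∈ w.toList := hsuf.subset he
  simpa [List.singleton_infix_iff] using hm

-- A's '"." in word and any(endswith …)' is B's endswith alternation
lemma pv_dot (w : String) :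
    (PySem.Str.isIn "." w && pvExtsA.any (fun ext => PySem.Str.endswith w ext)) = pvEndsExt w := by
  have hexp : pvExtsA.any (fun ext => PySem.Str.endswith w ext) = pvEndsExt w := by
    simp [pvExtsA, pvEndsExt, Bool.or_assoc]
  rw [hexp]
  cases h : pvEndsExt w
  · simp
  · have hdot : PySem.Str.isIn "." w = true := by
      simp only [pvEndsExt, Bool.or_eq_true] at h
      rcases h with ((((h|h)|h)|h)|h) <;> exact pv_ends_dot w _ (by decide) h
    have hdot' : PySem.Chars.isIn ['.'] w.toList = true := by simpa using hdot
    simp [hdot']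

-- A's inner word loop appends exactly the pvEndsExt-filtered words
lemma pv_A_inner (ws : List String) : ∀ acc : List String,
    ws.foldl (fun acc2 w =>
      if PySem.Str.isIn "." w && pvExtsA.any (fun ext => PySem.Str.endswith w ext) then acc2 ++ [w]
      else acc2) acc = acc ++ ws.filter pvEndsExt := by
  induction ws with
  | nil => intro acc; simp
  | cons w t ih =>
    intro acc
    rw [List.foldl_cons, pv_dot]
    by_cases h : pvEndsExt w
    · rw [if_pos h, ih, List.filter_cons, if_pos h]
      simp [List.append_assoc]
    · rw [if_neg h, ih, List.filter_cons, if_neg h]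

-- B's line predicate, named
def pvHit (line : String) : Bool :=
  PySem.Str.isIn "fixed:" (PySem.Str.lower line) || PySem.Str.isIn "modified:" (PySem.Str.lower line) ||
  PySem.Str.isIn "updated:" (PySem.Str.lower line) || PySem.Str.isIn "changed:" (PySem.Str.lower line)

lemma pv_hit_eq (line : String) :
    pvKwsA.any (fun kw => PySem.Str.isIn kw (PySem.Str.lower line)) = pvHit line := by
  simp [pvKwsA, pvHit, Bool.or_assoc]

-- A's per-line step, named
def pvStepA : List String → String → List String := fun acc line =>
  if pvHit line then acc ++ (PySem.Str.split₀ line).filter pvEndsExt else acc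

lemma pv_funA : (fun (acc : List String) (line : String) =>
    if pvKwsA.any (fun kw => PySem.Str.isIn kw (PySem.Str.lower line)) then
      (PySem.Str.split₀ line).foldl (fun acc2 w =>
        if PySem.Str.isIn "." w && pvExtsA.any (fun ext => PySem.Str.endswith w ext) then
          acc2 ++ [w]
        else acc2) acc
    else acc) = pvStepA := by
  funext acc line
  rw [pv_hit_eq, pv_A_inner]
  rfl

-- B's token findall is A's filtered split()
lemma pv_tokens_eq (line : String) :
    pvTokenFindall line = (PySem.Str.split₀ line).filter pvEndsExt := by
  unfold pvTokenFindall
  rw [← pv_split₀_eq]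
  rfl

lemma pv_set_append (acc xs : List String) :
    PySem.Set.ofList (acc ++ xs) = PySem.Set.update (PySem.Set.ofList acc) xs := by
  simp [PySem.Set.ofList, PySem.Set.update, List.foldl_append]

-- main: B's filter-then-update fold equals set(A's single accumulating fold)
lemma pv_main (lines : List String) : ∀ acc : List String,
    (lines.filter pvHit).foldl (fun s line => PySem.Set.update s (pvTokenFindall line))
        (PySem.Set.ofList acc)
      = PySem.Set.ofList (lines.foldl pvStepA acc) := by
  induction lines with
  | nil => intro acc; rfl
  | cons line rest ih =>
    intro acc
    rw [List.filter_cons, List.foldl_cons,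
        show pvStepA acc line
          = (if pvHit line then acc ++ (PySem.Str.split₀ line).filter pvEndsExt else acc) from rfl]
    cases h : pvHit line
    · simp only [Bool.false_eq_true, if_false]
      exact ih acc
    · simp only [if_true, List.foldl_cons]
      rw [pv_tokens_eq, ← pv_set_append]
      exact ih _

-- ===== VERDICT (by name: the statement is the Claim_ definition above) =====
theorem extract_fixed_files_py_spec : Claim_equal_extract_fixed_files_py := by
  intro output _
  unfold Spec_extract_fixed_files_py extract_fixed_files_py extract_fixed_files_py_alt pvLineFindall
  rw [pv_funA]
  exact (pv_main _ []).symm
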